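-- pv_equiv track=rewrite | github.com/mahmood726-cyber/qualsynth | qualsynth/formal_concept.py | _lattice_height
-- ===== SOURCE A (Python) =====
-- def _lattice_height(concepts):
--     """Compute lattice height: length of the longest chain.
--
--     A chain is a sequence c0 < c1 < ... < ck where each is a subconcept.
--     Height = k (number of edges in longest chain).
--     """
--     n = len(concepts)
--     if n <= 1:
--         return 0
--
--     # Build subconcept graph
--     # i -> j means concepts[i] < concepts[j] (i has strictly smaller extent)
--     children = [[] for _ in range(n)]
--     for i in range(n):
--         for j in range(n):
--             if i != j and concepts[i][0] < concepts[j][0]: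
--                 children[i].append(j)
--
--     # Find longest path using DFS with memoization
--     memo = {}
--
--     def _longest_up(node):
--         if node in memo:
--             return memo[node]
--         best = 0
--         for ch in children[node]:
--             best = max(best, 1 + _longest_up(ch))
--         memo[node] = best
--         return best
--
--     height = 0
--     for i in range(n):
--         height = max(height, _longest_up(i))
--
--     return height
-- ===== SOURCE B (Python) =====
-- def _lattice_height(concepts):
--     # Iterative DP: process extents largest-first, so every strict superset of an
--     # extent is already processed; no adjacency lists, no recursion.
--     n = len(concepts)
--     if n <= 1:
--         return 0
--     height = 0
--     done = []  # (extent, longest chain upward from it), larger extents first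
--     for e in sorted((c[0] for c in concepts), key=len, reverse=True):
--         best = 0
--         for d, v in done:
--             if e < d:
--                 best = max(best, v + 1)
--         done.append((e, best))
--         height = max(height, best)
--     return height
-- ===== Notes on version B (the rewrite author's own statement) =====
-- stated objective: alternative
-- what changed: Replaces the O(n^2) children-adjacency build plus recursive memoized DFS by one iterative DP sweep: extents sorted by size descending so every strict superset is already processed, each dp value read off the processed prefix.
import Mathlib
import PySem

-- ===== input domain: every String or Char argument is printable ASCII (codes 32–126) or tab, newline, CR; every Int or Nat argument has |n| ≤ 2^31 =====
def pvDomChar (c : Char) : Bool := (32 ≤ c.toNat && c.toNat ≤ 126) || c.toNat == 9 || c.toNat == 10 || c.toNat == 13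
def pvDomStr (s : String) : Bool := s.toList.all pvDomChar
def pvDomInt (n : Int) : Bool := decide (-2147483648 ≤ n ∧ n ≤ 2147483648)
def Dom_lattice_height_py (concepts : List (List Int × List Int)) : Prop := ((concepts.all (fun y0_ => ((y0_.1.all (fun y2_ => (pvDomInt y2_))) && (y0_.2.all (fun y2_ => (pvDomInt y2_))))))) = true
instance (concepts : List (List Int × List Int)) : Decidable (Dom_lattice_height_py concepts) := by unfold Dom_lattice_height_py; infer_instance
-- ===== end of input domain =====

-- B replaces A's adjacency-list build + memoized DFS by one iterative DP sweep over the
-- extents sorted by size descending (objective: alternative; same asymptotic cost).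

-- ===== PORT A =====
-- Python's '<' on two sets (proper subset); both sets are given as duplicate-free lists.
def pvPSub (s t : List Int) : Bool := PySem.Set.issubset s t && !(PySem.Set.equal s t)

-- children[i] = [j for j in range(n) if i != j and concepts[i][0] < concepts[j][0]]
def pvChildrenA (extents : List (List Int)) (i : Nat) : List Nat :=
  (List.range extents.length).filter
    (fun j => decide (i ≠ j) && pvPSub (extents.getD i []) (extents.getD j []))

-- _longest_up: Python memoizes for speed; this fuelled recursion computes the same
-- values (fuel = n bounds the recursion depth, which Python never exceeds).
def pvLongestUpA (children : Nat → List Nat) : Nat → Nat → Int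
  | 0, _ => 0
  | f + 1, node =>
      (children node).foldl (fun best ch => max best (1 + pvLongestUpA children f ch)) 0

def lattice_height_py (concepts : List (List Int × List Int)) : Int :=
  let n := concepts.length
  if n ≤ 1 then 0
  else
    let extents := concepts.map Prod.fst
    let children := fun i => pvChildrenA extents i
    (List.range n).foldl (fun h i => max h (pvLongestUpA children n i)) 0

-- ===== PORT B =====
def lattice_height_py_alt (concepts : List (List Int × List Int)) : Int :=
  if concepts.length ≤ 1 then 0
  else
    -- for e in sorted((c[0] for c in concepts), key=len, reverse=True): …
    ((PySem.List.sorted (concepts.map Prod.fst) (fun e => e.length) true).foldl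
      (fun (acc : Int × List (List Int × Int)) e =>
        let best := acc.2.foldl (fun b dv => if pvPSub e dv.1 then max b (dv.2 + 1) else b) 0
        (max acc.1 best, acc.2 ++ [(e, best)]))
      (0, [])).1

-- ===== PRECONDITION & SPEC =====
-- Pre_ is the set→list convention of the type mapping: each argument component encodes a
-- Python set, i.e. is a duplicate-free list.  A itself never raises.
def Pre_lattice_height_py (concepts : List (List Int × List Int)) : Prop :=
  ∀ c ∈ concepts, c.1.Nodup ∧ c.2.Nodup
instance (concepts : List (List Int × List Int)) : Decidable (Pre_lattice_height_py concepts) := by unfold Pre_lattice_height_py; infer_instance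
def pvWitness_lattice_height_py : (List (List Int × List Int)) := [([0], [0]), ([0, 1], [1])]
def Spec_lattice_height_py (concepts : List (List Int × List Int)) (out : Int) : Prop := out = lattice_height_py_alt concepts
instance (concepts : List (List Int × List Int)) (out : Int) : Decidable (Spec_lattice_height_py concepts out) := by unfold Spec_lattice_height_py; infer_instance

-- ===== CLAIM (what is proved, stated in full; the proofs are below) =====
def Claim_equal_lattice_height_py : Prop := ∀ (concepts : List (List Int × List Int)), Dom_lattice_height_py concepts → Pre_lattice_height_py concepts → Spec_lattice_height_py concepts (lattice_height_py concepts)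

-- ===== LEMMAS AND PROOFS =====

theorem pvPSub_irrefl (s : List Int) : pvPSub s s = false := by
  simp [pvPSub, PySem.Set.equal, PySem.Set.issubset_iff]

theorem pvPSub_iff (s t : List Int) :
    pvPSub s t = true ↔ (∀ x ∈ s, x ∈ t) ∧ ¬ (∀ x ∈ t, x ∈ s) := by
  constructor
  · intro h
    simp only [pvPSub, Bool.and_eq_true, Bool.not_eq_true'] at h
    refine ⟨(PySem.Set.issubset_iff s t).mp h.1, fun hc => ?_⟩
    have : PySem.Set.equal s t = true := by
      simp only [PySem.Set.equal, Bool.and_eq_true]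
      exact ⟨h.1, (PySem.Set.issubset_iff t s).mpr hc⟩
    rw [this] at h; exact absurd h.2 (by simp)
  · intro ⟨h1, h2⟩
    simp only [pvPSub, Bool.and_eq_true, Bool.not_eq_true']
    refine ⟨(PySem.Set.issubset_iff s t).mpr h1, ?_⟩
    by_contra hc
    have hc' : PySem.Set.equal s t = true := by revert hc; cases PySem.Set.equal s t <;> simp
    simp only [PySem.Set.equal, Bool.and_eq_true] at hc'
    exact h2 ((PySem.Set.issubset_iff t s).mp hc'.2)

theorem pvPSub_trans (a b c : List Int) (h1 : pvPSub a b = true) (h2 : pvPSub b c = true) :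
    pvPSub a c = true := by
  rw [pvPSub_iff] at *
  refine ⟨fun x hx => h2.1 x (h1.1 x hx), fun hc => ?_⟩
  exact h2.2 (fun x hx => h1.1 x (hc x hx))

-- a proper subset of sets is strictly shorter (needs the duplicate-free convention)
theorem pvPSub_length (s t : List Int) (hs : s.Nodup) (ht : t.Nodup)
    (h : pvPSub s t = true) : s.length < t.length := by
  rw [pvPSub_iff] at h
  have hsub : s.toFinset ⊆ t.toFinset := by
    intro x hx
    exact List.mem_toFinset.mpr (h.1 x (List.mem_toFinset.mp hx))
  have hne : s.toFinset ≠ t.toFinset := by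
    intro he
    exact h.2 (fun x hx => List.mem_toFinset.mp (he ▸ List.mem_toFinset.mpr hx))
  have := Finset.card_lt_card (lt_of_le_of_ne hsub hne)
  rwa [List.toFinset_card_of_nodup hs, List.toFinset_card_of_nodup ht] at this

theorem pv_countP_lt {α : Type} (l : List α) (p q : α → Bool)
    (h : ∀ d ∈ l, q d = true → p d = true) (x : α) (hx : x ∈ l)
    (hpx : p x = true) (hqx : q x = false) : l.countP q < l.countP p := by
  induction l with
  | nil => simp at hx
  | cons a l ih =>
    rw [List.countP_cons, List.countP_cons]
    rcases List.mem_cons.mp hx with rfl | hx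
    · have h1 : l.countP q ≤ l.countP p :=
        List.countP_mono_left (fun d hd => h d (List.mem_cons_of_mem _ hd))
      simp only [hpx, hqx, if_true, if_false, Bool.false_eq_true]
      omega
    · have := ih (fun d hd hq => h d (List.mem_cons_of_mem _ hd) hq) hx
      have h2 : (if q a then 1 else 0) ≤ (if p a then 1 else 0) := by
        by_cases hq : q a = true
        · simp [hq, h a List.mem_cons_self hq]
        · simp_all
      omega

-- termination measure for pvUp: number of strict supersets in xs
def pvGS (xs : List (List Int)) (e : List Int) : Nat :=
  xs.countP (fun d => pvPSub e d)

theorem pvGS_lt (xs : List (List Int)) (e d : List Int) (hd : d ∈ xs)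
    (h : pvPSub e d = true) : pvGS xs d < pvGS xs e :=
  pv_countP_lt xs _ _ (fun x _ hx => pvPSub_trans e d x h hx) d hd h (pvPSub_irrefl d)

-- longest chain strictly upward (in edges) from extent e inside the multiset xs
def pvUp (xs : List (List Int)) (e : List Int) : Int :=
  xs.attach.foldl
    (fun b d => if h : pvPSub e d.1 = true then max b (1 + pvUp xs d.1) else b) 0
termination_by pvGS xs e
decreasing_by exact pvGS_lt xs e d.1 d.2 h

theorem pvUp_eq (xs : List (List Int)) (e : List Int) :
    pvUp xs e = xs.foldl (fun b d => if pvPSub e d then max b (1 + pvUp xs d) else b) 0 := by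
  rw [pvUp]
  rw [show (fun (b : Int) (d : {x // x ∈ xs}) =>
      if h : pvPSub e d.1 = true then max b (1 + pvUp xs d.1) else b)
    = (fun b d => if pvPSub e d.1 then max b (1 + pvUp xs d.1) else b) from by
      funext b d; rw [dite_eq_ite]]
  exact List.foldl_attach (f := fun b d => if pvPSub e d then max b (1 + pvUp xs d) else b) (b := 0)

theorem pv_foldl_max_spec {α : Type} (cs : List α) (u : α → Int) (a : Int) :
    a ≤ cs.foldl (fun b ch => max b (u ch)) a ∧
    (∀ ch ∈ cs, u ch ≤ cs.foldl (fun b ch => max b (u ch)) a) ∧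
    (cs.foldl (fun b ch => max b (u ch)) a = a ∨
      ∃ ch ∈ cs, cs.foldl (fun b ch => max b (u ch)) a = u ch) := by
  induction cs generalizing a with
  | nil => simp
  | cons c cs ih =>
    simp only [List.foldl_cons]
    obtain ⟨h1, h2, h3⟩ := ih (max a (u c))
    refine ⟨le_trans (le_max_left _ _) h1, ?_, ?_⟩
    · intro ch hch
      rcases List.mem_cons.mp hch with rfl | hch
      · exact le_trans (le_max_right _ _) h1
      · exact h2 ch hch
    · rcases h3 with h3 | ⟨ch, hch, h3⟩
      · rcases max_choice a (u c) with hm | hm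
        · exact Or.inl (h3.trans hm)
        · exact Or.inr ⟨c, List.mem_cons_self, h3.trans hm⟩
      · exact Or.inr ⟨ch, List.mem_cons_of_mem _ hch, h3⟩

theorem pv_foldl_gmax_spec {α : Type} (cs : List α) (p : α → Bool) (u : α → Int) (a : Int) :
    a ≤ cs.foldl (fun b d => if p d then max b (u d) else b) a ∧
    (∀ d ∈ cs, p d = true → u d ≤ cs.foldl (fun b d => if p d then max b (u d) else b) a) ∧
    (cs.foldl (fun b d => if p d then max b (u d) else b) a = a ∨
      ∃ d ∈ cs, p d = true ∧ cs.foldl (fun b d => if p d then max b (u d) else b) a = u d) := by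
  induction cs generalizing a with
  | nil => simp
  | cons c cs ih =>
    simp only [List.foldl_cons]
    by_cases hp : p c = true
    · rw [if_pos hp]
      obtain ⟨h1, h2, h3⟩ := ih (max a (u c))
      refine ⟨le_trans (le_max_left _ _) h1, ?_, ?_⟩
      · intro d hd hpd
        rcases List.mem_cons.mp hd with rfl | hd
        · exact le_trans (le_max_right _ _) h1
        · exact h2 d hd hpd
      · rcases h3 with h3 | ⟨d, hd, hpd, h3⟩
        · rcases max_choice a (u c) with hm | hm
          · exact Or.inl (h3.trans hm)
          · exact Or.inr ⟨c, List.mem_cons_self, hp, h3.trans hm⟩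
        · exact Or.inr ⟨d, List.mem_cons_of_mem _ hd, hpd, h3⟩
    · rw [if_neg hp]
      obtain ⟨h1, h2, h3⟩ := ih a
      refine ⟨h1, ?_, ?_⟩
      · intro d hd hpd
        rcases List.mem_cons.mp hd with rfl | hd
        · exact absurd hpd hp
        · exact h2 d hd hpd
      · rcases h3 with h3 | ⟨d, hd, hpd, h3⟩
        · exact Or.inl h3
        · exact Or.inr ⟨d, List.mem_cons_of_mem _ hd, hpd, h3⟩

theorem pv_getD_mem (xs : List (List Int)) (i : Nat) (h : i < xs.length) :
    xs.getD i [] ∈ xs := by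
  rw [List.getD_eq_getElem xs [] h]
  exact List.getElem_mem h

theorem pv_mem_getD (xs : List (List Int)) (m : List Int) (hm : m ∈ xs) :
    ∃ j, j < xs.length ∧ xs.getD j [] = m := by
  obtain ⟨j, hj, hje⟩ := List.mem_iff_getElem.mp hm
  exact ⟨j, hj, by rw [List.getD_eq_getElem xs [] hj]; exact hje⟩

theorem pv_mem_children (xs : List (List Int)) (i j : Nat) :
    j ∈ pvChildrenA xs i ↔
      j < xs.length ∧ i ≠ j ∧ pvPSub (xs.getD i []) (xs.getD j []) = true := by
  simp [pvChildrenA, List.mem_filter, List.mem_range]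

-- A's fuelled DFS computes pvUp once the fuel dominates the superset count
theorem pv_LU (xs : List (List Int)) :
    ∀ fuel i, i < xs.length → pvGS xs (xs.getD i []) < fuel →
      pvLongestUpA (pvChildrenA xs) fuel i = pvUp xs (xs.getD i []) := by
  intro fuel
  induction fuel with
  | zero => intro i _ h; omega
  | succ f ih =>
    intro i hi hg
    obtain ⟨hr0, hub, hcases⟩ := pv_foldl_max_spec (pvChildrenA xs i)
      (fun ch => 1 + pvLongestUpA (pvChildrenA xs) f ch) 0
    obtain ⟨gr0, gub, gcases⟩ := pv_foldl_gmax_spec xs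
      (fun d => pvPSub (xs.getD i []) d) (fun d => 1 + pvUp xs d) 0
    rw [show pvLongestUpA (pvChildrenA xs) (f + 1) i =
        (pvChildrenA xs i).foldl
          (fun best ch => max best (1 + pvLongestUpA (pvChildrenA xs) f ch)) 0 from rfl,
      pvUp_eq]
    have hval : ∀ ch ∈ pvChildrenA xs i,
        pvLongestUpA (pvChildrenA xs) f ch = pvUp xs (xs.getD ch []) := by
      intro ch hch
      obtain ⟨hch1, _, hch3⟩ := (pv_mem_children xs i ch).mp hch
      exact ih ch hch1 (by
        have := pvGS_lt xs (xs.getD i []) (xs.getD ch []) (pv_getD_mem xs ch hch1) hch3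
        omega)
    apply le_antisymm
    · rcases hcases with h0 | ⟨ch, hch, hv⟩
      · rw [h0]; exact gr0
      · rw [hv, hval ch hch]
        obtain ⟨hch1, _, hch3⟩ := (pv_mem_children xs i ch).mp hch
        exact gub (xs.getD ch []) (pv_getD_mem xs ch hch1) hch3
    · rcases gcases with g0 | ⟨d, hd, hpd, gv⟩
      · rw [g0]; exact hr0
      · rw [gv]
        obtain ⟨j, hj, hje⟩ := pv_mem_getD xs d hd
        have hij : i ≠ j := by
          intro h; subst h
          rw [hje] at hpd
          rw [← hje, pvPSub_irrefl] at hpd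
          exact absurd hpd (by simp)
        have hjc : j ∈ pvChildrenA xs i :=
          (pv_mem_children xs i j).mpr ⟨hj, hij, by rw [hje]; exact hpd⟩
        have := hub j hjc
        rw [hval j hjc, hje] at this
        exact this

-- B's DP sweep: once every strict superset of every pending extent sits in the processed
-- prefix (with its pvUp value), each new dp value is exactly pvUp
theorem pvB_loop (xs : List (List Int)) (hnd : ∀ d ∈ xs, d.Nodup) :
    ∀ (suf pre : List (List Int)) (h0 : Int),
      (pre ++ suf).Pairwise (fun a b => b.length ≤ a.length) →
      (∀ d ∈ pre ++ suf, d ∈ xs) →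
      (∀ d ∈ xs, d ∈ pre ++ suf) →
      (suf.foldl
        (fun (acc : Int × List (List Int × Int)) e =>
          let best := acc.2.foldl (fun b dv => if pvPSub e dv.1 then max b (dv.2 + 1) else b) 0
          (max acc.1 best, acc.2 ++ [(e, best)]))
        (h0, pre.map (fun d => (d, pvUp xs d)))).1
      = suf.foldl (fun b e => max b (pvUp xs e)) h0 := by
  intro suf
  induction suf with
  | nil => intro pre h0 _ _ _; rfl
  | cons e suf ih =>
    intro pre h0 hpw hmem1 hmem2
    have hexs : e ∈ xs := hmem1 e (by simp)
    have hbest :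
        (pre.map (fun d => (d, pvUp xs d))).foldl
          (fun b dv => if pvPSub e dv.1 then max b (dv.2 + 1) else b) 0 = pvUp xs e := by
      obtain ⟨br0, bub, bcases⟩ := pv_foldl_gmax_spec (pre.map (fun d => (d, pvUp xs d)))
        (fun dv => pvPSub e dv.1) (fun dv => dv.2 + 1) 0
      obtain ⟨gr0, gub, gcases⟩ := pv_foldl_gmax_spec xs
        (fun d => pvPSub e d) (fun d => 1 + pvUp xs d) 0
      rw [pvUp_eq]
      apply le_antisymm
      · rcases bcases with h0' | ⟨dv, hdv, hpdv, hv⟩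
        · rw [h0']; exact gr0
        · obtain ⟨d, hdpre, rfl⟩ := List.mem_map.mp hdv
          rw [hv]
          have := gub d (hmem1 d (List.mem_append_left _ hdpre)) hpdv
          omega
      · rcases gcases with g0 | ⟨d, hd, hpd, gv⟩
        · rw [g0]; exact br0
        · rw [gv]
          have hdpre : d ∈ pre := by
            rcases List.mem_append.mp (hmem2 d hd) with h | h
            · exact h
            · rcases List.mem_cons.mp h with rfl | h
              · rw [pvPSub_irrefl] at hpd; exact absurd hpd (by simp)
              · exfalso
                have hle : d.length ≤ e.length := by
                  have hps : (e :: suf).Pairwise (fun a b => b.length ≤ a.length) :=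
                    (List.pairwise_append.mp hpw).2.1
                  exact (List.pairwise_cons.mp hps).1 d h
                have := pvPSub_length e d (hnd e hexs) (hnd d hd) hpd
                omega
          have := bub (d, pvUp xs d) (List.mem_map.mpr ⟨d, hdpre, rfl⟩) hpd
          omega
    simp only [List.foldl_cons]
    rw [hbest]
    have hpre' : (pre ++ [e]).map (fun d => (d, pvUp xs d))
        = pre.map (fun d => (d, pvUp xs d)) ++ [(e, pvUp xs e)] := by simp
    rw [← hpre']
    have hassoc : (pre ++ [e]) ++ suf = pre ++ e :: suf := by simp
    exact ih (pre ++ [e]) (max h0 (pvUp xs e))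
      (by rw [hassoc]; exact hpw) (by rw [hassoc]; exact hmem1) (by rw [hassoc]; exact hmem2)

-- ===== VERDICT (by name: the statement is the Claim_ definition above) =====
theorem lattice_height_py_spec : Claim_equal_lattice_height_py := by
  intro concepts _ hpre
  unfold Spec_lattice_height_py lattice_height_py lattice_height_py_alt
  by_cases h : concepts.length ≤ 1
  · simp [h]
  · simp only [h, if_false]
    set xs := concepts.map Prod.fst with hxs
    have hlen : xs.length = concepts.length := by simp [hxs]
    have hnd : ∀ d ∈ xs, d.Nodup := by
      intro d hd
      obtain ⟨c, hc, rfl⟩ := List.mem_map.mp hd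
      exact (hpre c hc).1
    set ys := PySem.List.sorted xs (fun e => e.length) true with hys
    have hperm : ys.Perm xs := PySem.List.sorted_perm xs (fun e => e.length) true
    have hpw : ys.Pairwise (fun a b => b.length ≤ a.length) :=
      PySem.List.sorted_pairwise_rev xs (fun e => e.length)
    -- B side: the sweep computes the fold of max pvUp over ys
    have hB := pvB_loop xs hnd ys [] 0
      (by simpa using hpw)
      (by intro d hd; exact hperm.mem_iff.mp (by simpa using hd))
      (by intro d hd; simpa using hperm.mem_iff.mpr hd)
    simp only [List.map_nil] at hB
    rw [hB]
    -- A side: replace each fuelled DFS value by pvUp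
    have hA : (List.range concepts.length).foldl
        (fun h i => max h (pvLongestUpA (fun i => pvChildrenA xs i) concepts.length i)) 0
      = (List.range concepts.length).foldl
        (fun h i => max h (pvUp xs (xs.getD i []))) 0 := by
      apply PySem.List.foldl_congr_mem
      intro acc i hi
      have hi' : i < xs.length := by rw [hlen]; exact List.mem_range.mp hi
      have hg : pvGS xs (xs.getD i []) < concepts.length := by
        have := pv_countP_lt xs (fun _ => true) (fun d => pvPSub (xs.getD i []) d)
          (by simp) (xs.getD i []) (pv_getD_mem xs i hi') rfl
          (pvPSub_irrefl (xs.getD i []))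
        simp only [List.countP_true] at this
        unfold pvGS
        omega
      rw [pv_LU xs concepts.length i hi' hg]
    rw [hA]
    -- both sides are the max of pvUp over the same multiset of extents
    obtain ⟨ar0, aub, acases⟩ := pv_foldl_max_spec (List.range concepts.length)
      (fun i => pvUp xs (xs.getD i [])) 0
    obtain ⟨br0, bub, bcases⟩ := pv_foldl_max_spec ys (fun e => pvUp xs e) 0
    apply le_antisymm
    · rcases acases with h0 | ⟨i, hi, hv⟩
      · rw [h0]; exact br0
      · rw [hv]
        have hi' : i < xs.length := by rw [hlen]; exact List.mem_range.mp hi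
        exact bub (xs.getD i []) (hperm.mem_iff.mpr (pv_getD_mem xs i hi'))
    · rcases bcases with h0 | ⟨e, he, hv⟩
      · rw [h0]; exact ar0
      · rw [hv]
        obtain ⟨j, hj, hje⟩ := pv_mem_getD xs e (hperm.mem_iff.mp he)
        have := aub j (List.mem_range.mpr (by omega))
        rw [hje] at this
        exact this
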